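-- pv_equiv track=rewrite | github.com/newdboy/hangum | main.py | target_text_searcher
-- ===== SOURCE A (Python) =====
-- def target_text_searcher(target, test):
--     tmp = list()
--     idx = -1
--     while True:
--         idx = test.find(target, idx + 1)
--         if idx == -1:
--             break
--
--         from_n = idx - 10
--         to_n = idx + 10
--         if from_n < 0:
--             from_n = 0
--         if to_n > idx+len(target):
--             to_n = idx+len(target)+3
--         if to_n > len(test):
--             to_n = len(test)
--         tmp.append(test[from_n:idx]+'*'+test[idx:idx+len(target)]+'*'+test[idx+len(target):to_n])
--     return tmp
-- ===== SOURCE B (Python) =====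
-- def target_text_searcher(target, test):
--     # Rabin-Karp: roll a polynomial hash over every window of len(target); on a hash
--     # match, confirm with a direct comparison, then emit the starred context snippet.
--     L, n = len(target), len(test)
--     B, M = 257, (1 << 61) - 1
--     ht = 0
--     for c in target:
--         ht = (ht * B + ord(c)) % M
--     pw = 1
--     for _ in range(L):
--         pw = pw * B % M
--     h = 0
--     for c in test[:L]:
--         h = (h * B + ord(c)) % M
--     out = []
--     for i in range(n - L + 1):
--         if h == ht and test[i:i + L] == target:
--             lo = max(0, i - 10)
--             hi = min(i + 10 if L >= 10 else i + L + 3, n)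
--             out.append(test[lo:i] + '*' + target + '*' + test[i + L:hi])
--         if i + L < n:
--             h = (h * B - ord(test[i]) * pw + ord(test[i + L])) % M
--     return out
-- ===== Notes on version B (the rewrite author's own statement) =====
-- stated objective: alternative
-- what changed: B locates the occurrences with a Rabin-Karp rolling polynomial hash (base 257 mod 2^61-1): it hashes every length-L window incrementally and, on a hash match confirmed by one direct comparison, emits the starred snippet; A instead loops test.find(target, idx+1).
import Mathlib
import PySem

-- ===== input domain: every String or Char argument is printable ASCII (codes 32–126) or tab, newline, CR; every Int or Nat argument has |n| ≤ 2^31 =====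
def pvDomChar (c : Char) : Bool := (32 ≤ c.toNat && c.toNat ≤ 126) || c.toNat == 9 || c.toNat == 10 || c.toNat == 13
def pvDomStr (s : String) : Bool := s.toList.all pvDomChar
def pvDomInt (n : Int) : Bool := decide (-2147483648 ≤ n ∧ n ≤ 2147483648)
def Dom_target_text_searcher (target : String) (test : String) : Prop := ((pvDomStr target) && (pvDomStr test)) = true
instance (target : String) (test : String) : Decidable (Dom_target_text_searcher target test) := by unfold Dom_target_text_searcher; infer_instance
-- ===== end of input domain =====

-- B locates the matches with a Rabin-Karp rolling polynomial hash (hash every window,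
-- confirm a hash hit by direct comparison) instead of A's repeated-str.find loop; same
-- result, a different algorithm (no speed claim).

-- ===== PORT A =====
-- A's `while True: idx = test.find(target, idx+1) …` loop; fuel (length+2) only makes the
-- recursion total — idx strictly increases and is bounded by len(test), so it never runs out.
def targetLoopA (tgt te : List Char) : Nat → Int → List String → List String
  | 0, _, tmp => tmp
  | fuel + 1, idx, tmp =>
    let idx2 := PySem.Chars.findFrom te tgt (idx + 1) none
    if idx2 = -1 then tmp
    else
      let L : Int := tgt.length
      let from_n := if idx2 - 10 < 0 then 0 else idx2 - 10
      let to_n := idx2 + 10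
      let to_n := if to_n > idx2 + L then idx2 + L + 3 else to_n
      let to_n := if to_n > (te.length : Int) then (te.length : Int) else to_n
      targetLoopA tgt te fuel idx2
        (tmp ++ [String.ofList (PySem.List.slice te (some from_n) (some idx2) ++ ['*'] ++
                 PySem.List.slice te (some idx2) (some (idx2 + L)) ++ ['*'] ++
                 PySem.List.slice te (some (idx2 + L)) (some to_n))])

def target_text_searcher (target : String) (test : String) : List String :=
  targetLoopA target.toList test.toList (test.toList.length + 2) (-1) []

-- ===== PORT B =====
-- Source B's modulus M = 2^61 - 1 (the base is 257)
def pvM : Int := 2305843009213693951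

-- Source B's main `for i in range(n - L + 1)` loop, recursing on the number of remaining
-- iterations: append the snippet on a confirmed hash hit, then roll the hash.
-- `ord(test[i])` is in range under the loop's own guard `i + L < n`, so getD is exact.
def pvLoopB (tgt te : List Char) (ht pw : Int) : Nat → Nat → Int → List String → List String
  | _, 0, _, out => out
  | i, rem + 1, h, out =>
    let out' :=
      if h = ht ∧ PySem.List.slice te (some (i : Int)) (some ((i : Int) + (tgt.length : Int))) = tgt then
        out ++ [String.ofList (PySem.List.slice te (some (max 0 ((i : Int) - 10))) (some (i : Int)) ++ ['*'] ++
                tgt ++ ['*'] ++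
                PySem.List.slice te (some ((i : Int) + (tgt.length : Int)))
                  (some (min (if 10 ≤ tgt.length then (i : Int) + 10 else (i : Int) + (tgt.length : Int) + 3)
                             (te.length : Int))))]
      else out
    let h' :=
      if i + tgt.length < te.length then
        PySem.Int.mod (h * 257 - ((te.getD i ' ').toNat : Int) * pw +
                       ((te.getD (i + tgt.length) ' ').toNat : Int)) pvM
      else h
    pvLoopB tgt te ht pw (i + 1) rem h' out'

-- `range(n - L + 1)` has max(0, n - L + 1) iterations = Nat subtraction `n + 1 - L`.
def target_text_searcher_alt (target : String) (test : String) : List String :=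
  let tgt := target.toList
  let te := test.toList
  let ht := tgt.foldl (fun h c => PySem.Int.mod (h * 257 + (c.toNat : Int)) pvM) 0
  let pw := (List.range tgt.length).foldl (fun p _ => PySem.Int.mod (p * 257) pvM) 1
  let h0 := (te.take tgt.length).foldl (fun h c => PySem.Int.mod (h * 257 + (c.toNat : Int)) pvM) 0
  pvLoopB tgt te ht pw 0 (te.length + 1 - tgt.length) h0 []

-- ===== PRECONDITION & SPEC =====
def Spec_target_text_searcher (target : String) (test : String) (out : List String) : Prop := out = target_text_searcher_alt target test
instance (target : String) (test : String) (out : List String) : Decidable (Spec_target_text_searcher target test out) := by unfold Spec_target_text_searcher; infer_instance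

-- ===== CLAIM (what is proved, stated in full; the proofs are below) =====
def Claim_equal_target_text_searcher : Prop := ∀ (target : String) (test : String), Dom_target_text_searcher target test → Spec_target_text_searcher target test (target_text_searcher target test)

-- ===== LEMMAS AND PROOFS =====

-- proof-side abbreviations for Source B's hash pieces
def pvHash (l : List Char) : Int := l.foldl (fun h c => PySem.Int.mod (h * 257 + (c.toNat : Int)) pvM) 0
def pvPoly (l : List Char) : Int := l.foldl (fun h c => h * 257 + (c.toNat : Int)) 0
def pvPw (k : Nat) : Int := (List.range k).foldl (fun p _ => PySem.Int.mod (p * 257) pvM) 1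

-- the hit test "test[i:i+L] == target" and the snippet at a hit (shared by both proofs)
def pvHitP (tgt te : List Char) (i : Nat) : Bool :=
  decide (PySem.List.slice te (some (i : Int)) (some ((i : Int) + (tgt.length : Int))) = tgt)

def pvFmt (tgt te : List Char) (i : Nat) : String :=
  let lo : Int := max 0 ((i : Int) - 10)
  let hi : Int := min (if 10 ≤ tgt.length then (i : Int) + 10 else (i : Int) + (tgt.length : Int) + 3)
                      (te.length : Int)
  String.ofList (PySem.List.slice te (some lo) (some (i : Int)) ++ ['*'] ++ tgt ++ ['*'] ++
             PySem.List.slice te (some ((i : Int) + (tgt.length : Int))) (some hi))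

lemma pvM_pos : (0 : Int) < pvM := by unfold pvM; norm_num

-- find with a start past the end of the string returns -1 (even for an empty pattern)
lemma findFrom_past_len (te tgt : List Char) :
    PySem.Chars.findFrom te tgt ((te.length : Int) + 1) none = -1 := by
  simp only [PySem.Chars.findFrom]
  split_ifs <;> omega

-- pvHitP i is exactly "tgt is a prefix of te.drop i"
lemma pvHitP_iff (tgt te : List Char) (i : Nat) :
    pvHitP tgt te i = true ↔ tgt <+: te.drop i := by
  simp only [pvHitP, PySem.List.slice_natCast_add, decide_eq_true_eq]
  rw [List.prefix_iff_eq_take]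
  exact ⟨fun h => h.symm, fun h => h.symm⟩

-- splitting a filtered range at its first hit
lemma filter_range'_split (p : Nat → Bool) (k cnt m : Nat) (h1 : k ≤ m) (h2 : m < k + cnt)
    (hm : p m = true) (hlt : ∀ i, k ≤ i → i < m → p i = false) :
    (List.range' k cnt).filter p = m :: (List.range' (m + 1) (k + cnt - (m + 1))).filter p := by
  have hsplit : List.range' k cnt
      = List.range' k (m - k) ++ List.range' m (cnt - (m - k)) := by
    have h := @List.range'_append k (m - k) (cnt - (m - k)) 1
    simp only [one_mul] at h
    rw [show k + (m - k) = m by omega] at h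
    rw [h]
    congr 1
    omega
  have hsplit2 : List.range' m (cnt - (m - k))
      = m :: List.range' (m + 1) (k + cnt - (m + 1)) := by
    rw [show cnt - (m - k) = (k + cnt - (m + 1)) + 1 by omega, List.range'_succ]
  rw [hsplit, hsplit2, List.filter_append]
  have hfe : (List.range' k (m - k)).filter p = [] := by
    rw [List.filter_eq_nil_iff]
    intro a ha
    rw [List.mem_range'_1] at ha
    simp [hlt a ha.1 (by omega)]
  rw [hfe, List.filter_cons_of_pos hm]
  simp

-- A's snippet at a true hit m equals the shared formatted snippet
lemma snippet_eq (tgt te : List Char) (m : Nat) (hpre : tgt <+: te.drop m) :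
    String.ofList (PySem.List.slice te
        (some (if (m : Int) - 10 < 0 then 0 else (m : Int) - 10)) (some (m : Int)) ++ ['*'] ++
      PySem.List.slice te (some (m : Int)) (some ((m : Int) + (tgt.length : Int))) ++ ['*'] ++
      PySem.List.slice te (some ((m : Int) + (tgt.length : Int)))
        (some (if (if (m : Int) + 10 > (m : Int) + (tgt.length : Int)
                   then (m : Int) + (tgt.length : Int) + 3 else (m : Int) + 10) > (te.length : Int)
               then (te.length : Int)
               else (if (m : Int) + 10 > (m : Int) + (tgt.length : Int)
                     then (m : Int) + (tgt.length : Int) + 3 else (m : Int) + 10))))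
    = pvFmt tgt te m := by
  unfold pvFmt
  have hmid : PySem.List.slice te (some (m : Int)) (some ((m : Int) + (tgt.length : Int))) = tgt := by
    rw [PySem.List.slice_natCast_add]
    exact ((List.prefix_iff_eq_take.mp hpre)).symm
  rw [hmid]
  have hlo : (if (m : Int) - 10 < 0 then 0 else (m : Int) - 10) = max 0 ((m : Int) - 10) := by
    split_ifs <;> omega
  rw [hlo]
  have hhi : (if (if (m : Int) + 10 > (m : Int) + (tgt.length : Int)
                  then (m : Int) + (tgt.length : Int) + 3 else (m : Int) + 10) > (te.length : Int)
              then (te.length : Int)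
              else (if (m : Int) + 10 > (m : Int) + (tgt.length : Int)
                    then (m : Int) + (tgt.length : Int) + 3 else (m : Int) + 10))
      = min (if 10 ≤ tgt.length then (m : Int) + 10 else (m : Int) + (tgt.length : Int) + 3)
            (te.length : Int) := by
    simp only [min_def]
    have h10 : (10 ≤ tgt.length) ↔ ¬ ((m : Int) + 10 > (m : Int) + (tgt.length : Int)) := by
      constructor <;> intro h <;> omega
    split_ifs <;> omega
  rw [hhi]

-- when find fails on the tail from k, no position ≥ k is a hit
lemma no_hit_of_find_neg (tgt te : List Char) (k : Nat)
    (hf : PySem.Chars.find (te.drop k) tgt = -1) :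
    ∀ i, k ≤ i → pvHitP tgt te i = false := by
  intro i hki
  rw [PySem.Chars.find_eq_neg_one_iff] at hf
  by_contra h
  have hp : pvHitP tgt te i = true := by
    cases hhc : pvHitP tgt te i
    · exact absurd hhc h
    · rfl
  rw [pvHitP_iff] at hp
  have hdrop : (te.drop k).drop (i - k) = te.drop i := by
    rw [List.drop_drop]
    congr 1
    omega
  rw [← hdrop] at hp
  have hIn : ∃ j, tgt <+: (te.drop k).drop j := ⟨i - k, hp⟩
  rw [PySem.Chars.exists_prefix_drop_iff_isIn] at hIn
  have hFa : PySem.Chars.isIn tgt (te.drop k) = false :=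
    (PySem.Chars.isIn_eq_false_iff tgt (te.drop k)).mpr hf
  rw [hIn] at hFa
  exact Bool.true_eq_false.mp hFa

-- A-side loop invariant: from search start k with enough fuel, A's loop appends the formatted hits ≥ k
lemma targetLoopA_eq (tgt te : List Char) :
    ∀ cnt k fuel (tmp : List String), k + cnt = te.length + 1 → cnt < fuel →
      targetLoopA tgt te fuel ((k : Int) - 1) tmp
        = tmp ++ ((List.range' k cnt).filter (pvHitP tgt te)).map (pvFmt tgt te) := by
  intro cnt
  induction cnt using Nat.strong_induction_on with
  | _ cnt IH =>
    intro k fuel tmp hkc hfuel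
    obtain ⟨fuel', rfl⟩ : ∃ f', fuel = f' + 1 := ⟨fuel - 1, by omega⟩
    rw [targetLoopA]
    have hst : (k : Int) - 1 + 1 = (k : Int) := by ring
    rw [hst]
    rcases Nat.lt_or_ge te.length k with hk | hk
    · -- k = te.length + 1, cnt = 0: find past the end fails
      have hk1 : k = te.length + 1 := by omega
      have hcnt0 : cnt = 0 := by omega
      have : PySem.Chars.findFrom te tgt (k : Int) none = -1 := by
        rw [hk1]
        push_cast
        exact findFrom_past_len te tgt
      simp [this, hcnt0]
    · -- k ≤ te.length: use findFrom_natCast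
      rw [PySem.Chars.findFrom_natCast te tgt k hk]
      by_cases hf : PySem.Chars.find (te.drop k) tgt = -1
      · have hnil : (List.range' k cnt).filter (pvHitP tgt te) = [] := by
          rw [List.filter_eq_nil_iff]
          intro a ha
          rw [List.mem_range'_1] at ha
          simp [no_hit_of_find_neg tgt te k hf a ha.1]
        rw [hf]
        norm_num [hnil]
      · have hf0 : 0 ≤ PySem.Chars.find (te.drop k) tgt := by
          have := PySem.Chars.neg_one_le_find (te.drop k) tgt
          omega
        have hfle : PySem.Chars.find (te.drop k) tgt ≤ ((te.drop k).length : Int) :=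
          PySem.Chars.find_le_length (te.drop k) tgt
        rw [List.length_drop] at hfle
        set f := PySem.Chars.find (te.drop k) tgt with hfdef
        have hne : ¬ ((f : Int) = -1) := hf
        rw [if_neg hne]
        have hne2 : ¬ ((k : Int) + f = -1) := by omega
        rw [if_neg hne2]
        -- the hit position
        set m : Nat := k + f.toNat with hmdef
        have hmI : (k : Int) + f = (m : Int) := by
          rw [hmdef]
          push_cast
          omega
        have hmle : m ≤ te.length := by omega
        obtain ⟨hpre, hmin⟩ := PySem.Chars.find_spec (s := te.drop k) (sub := tgt) hf0
        rw [← hfdef] at hpre hmin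
        have hdd : List.drop f.toNat (List.drop k te) = te.drop m := by
          rw [List.drop_drop]
        have hpre' : tgt <+: te.drop m := by
          rw [← hdd]
          exact hpre
        simp only [hmI]
        -- apply IH at k' = m + 1
        have hrec := IH (te.length - m) (by omega) (m + 1) fuel'
          (tmp ++ [String.ofList (PySem.List.slice te
              (some (if (m : Int) - 10 < 0 then 0 else (m : Int) - 10)) (some (m : Int)) ++ ['*'] ++
            PySem.List.slice te (some (m : Int)) (some ((m : Int) + (tgt.length : Int))) ++ ['*'] ++
            PySem.List.slice te (some ((m : Int) + (tgt.length : Int)))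
              (some (if (if (m : Int) + 10 > (m : Int) + (tgt.length : Int)
                         then (m : Int) + (tgt.length : Int) + 3 else (m : Int) + 10) > (te.length : Int)
                     then (te.length : Int)
                     else (if (m : Int) + 10 > (m : Int) + (tgt.length : Int)
                           then (m : Int) + (tgt.length : Int) + 3 else (m : Int) + 10))))])
          (by omega) (by omega)
        have hc : ((m + 1 : Nat) : Int) - 1 = (m : Int) := by push_cast; ring
        rw [hc] at hrec
        rw [hrec]
        have hsplit := filter_range'_split (pvHitP tgt te) k cnt m (by omega) (by omega)
          ((pvHitP_iff tgt te m).mpr hpre')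
          (by
            intro i hki him
            have : ¬ tgt <+: te.drop i := by
              have hd : (te.drop k).drop (i - k) = te.drop i := by
                rw [List.drop_drop]
                congr 1
                omega
              rw [← hd]
              exact hmin (i - k) (by omega)
            cases hh : pvHitP tgt te i
            · rfl
            · exact absurd ((pvHitP_iff tgt te i).mp hh) this)
        rw [hsplit]
        rw [show k + cnt - (m + 1) = te.length - m by omega]
        rw [List.map_cons]
        rw [snippet_eq tgt te m hpre']
        simp

-- ===== B-side lemmas: the rolling hash =====

-- the modded fold computes the plain polynomial fold, reduced mod M
lemma hash_eq_poly_mod (l : List Char) :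
    ∀ (a b : Int), a = b % pvM →
      l.foldl (fun h c => PySem.Int.mod (h * 257 + (c.toNat : Int)) pvM) a
        = (l.foldl (fun h c => h * 257 + (c.toNat : Int)) b) % pvM := by
  induction l with
  | nil => intro a b hab; simpa using hab
  | cons c l IH =>
    intro a b hab
    simp only [List.foldl_cons]
    apply IH
    rw [PySem.Int.mod_eq_emod_of_pos pvM_pos, hab]
    have hb : (b % pvM) ≡ b [ZMOD pvM] := Int.emod_emod_of_dvd b dvd_rfl
    exact (hb.mul_right 257).add (Int.ModEq.refl (c.toNat : Int))

lemma pvHash_eq (l : List Char) : pvHash l = pvPoly l % pvM :=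
  hash_eq_poly_mod l 0 0 (by norm_num)

-- the polynomial fold with an arbitrary accumulator
lemma poly_foldl_acc (l : List Char) :
    ∀ (a : Int), l.foldl (fun h c => h * 257 + (c.toNat : Int)) a
      = a * 257 ^ l.length + pvPoly l := by
  induction l with
  | nil => intro a; simp [pvPoly]
  | cons c l IH =>
    intro a
    simp only [List.foldl_cons, List.length_cons, pvPoly]
    rw [IH, IH (0 * 257 + (c.toNat : Int))]
    ring

lemma poly_cons (c : Char) (l : List Char) :
    pvPoly (c :: l) = (c.toNat : Int) * 257 ^ l.length + pvPoly l := by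
  unfold pvPoly
  simp only [List.foldl_cons]
  rw [poly_foldl_acc]
  ring_nf
  rfl

lemma poly_append_singleton (l : List Char) (c : Char) :
    pvPoly (l ++ [c]) = pvPoly l * 257 + (c.toNat : Int) := by
  unfold pvPoly
  rw [List.foldl_append]
  simp

lemma pvPw_eq (k : Nat) : pvPw k = 257 ^ k % pvM := by
  induction k with
  | zero => unfold pvPw pvM; decide
  | succ k IH =>
    unfold pvPw at *
    rw [List.range_succ, List.foldl_append]
    simp only [List.foldl_cons, List.foldl_nil]
    rw [IH, PySem.Int.mod_eq_emod_of_pos pvM_pos, pow_succ, Int.mul_emod,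
      Int.emod_emod_of_dvd _ dvd_rfl, ← Int.mul_emod]

-- rolling update: from the hash of window i, Source B's formula yields the hash of window i+1
lemma roll_eq (tgt te : List Char) (i : Nat) (hin : i + tgt.length < te.length) :
    PySem.Int.mod (pvHash ((te.drop i).take tgt.length) * 257
        - ((te.getD i ' ').toNat : Int) * pvPw tgt.length
        + ((te.getD (i + tgt.length) ' ').toNat : Int)) pvM
      = pvHash ((te.drop (i + 1)).take tgt.length) := by
  rcases Nat.eq_zero_or_pos tgt.length with hL | hL
  · -- empty pattern: both windows are empty, the formula cancels to 0
    rw [hL]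
    simp only [List.take_zero, Nat.add_zero]
    rw [PySem.Int.mod_eq_emod_of_pos pvM_pos]
    have h0 : pvHash [] = 0 := by simp [pvHash]
    have h1 : pvPw 0 = 1 := by unfold pvPw; simp
    rw [h0, h1]
    ring_nf
    simp
  · obtain ⟨L', hLL⟩ : ∃ L', tgt.length = L' + 1 := ⟨tgt.length - 1, by omega⟩
    have hi : i < te.length := by omega
    have hlen' : L' < (te.drop (i + 1)).length := by rw [List.length_drop]; omega
    have ha : te.getD i ' ' = te[i] := List.getD_eq_getElem te ' ' hi
    have hb : te.getD (i + tgt.length) ' ' = (te.drop (i + 1))[L']'hlen' := by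
      rw [List.getElem_drop]
      rw [show i + tgt.length = i + 1 + L' by omega]
      exact List.getD_eq_getElem te ' ' (by omega)
    -- window i = te[i] :: w,  window i+1 = w ++ [te[i+L]], where w = (te.drop (i+1)).take L'
    have hw1 : (te.drop i).take tgt.length = te[i] :: (te.drop (i + 1)).take L' := by
      rw [hLL, List.drop_eq_getElem_cons hi, List.take_succ_cons]
    have hw2 : (te.drop (i + 1)).take tgt.length
        = (te.drop (i + 1)).take L' ++ [(te.drop (i + 1))[L']'hlen'] := by
      rw [hLL, List.take_add_one, List.getElem?_eq_getElem hlen']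
      rfl
    have hwlen : ((te.drop (i + 1)).take L').length = L' := by
      rw [List.length_take]
      omega
    rw [hw1, hw2, ha, hb, pvHash_eq, pvHash_eq, poly_cons, poly_append_singleton, pvPw_eq,
      hwlen, PySem.Int.mod_eq_emod_of_pos pvM_pos]
    -- pure modular arithmetic now
    set A := ((te[i].toNat : Int)) with hA
    set Bc := (((te.drop (i + 1))[L']'hlen').toNat : Int) with hBc
    set W := pvPoly ((te.drop (i + 1)).take L') with hW
    have hx : ((A * 257 ^ L' + W) % pvM) ≡ (A * 257 ^ L' + W) [ZMOD pvM] :=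
      Int.emod_emod_of_dvd _ dvd_rfl
    have hp : ((257 : Int) ^ tgt.length % pvM) ≡ (257 : Int) ^ tgt.length [ZMOD pvM] :=
      Int.emod_emod_of_dvd _ dvd_rfl
    have h1 : ((A * 257 ^ L' + W) % pvM * 257 - A * (257 ^ tgt.length % pvM) + Bc) % pvM
        = ((A * 257 ^ L' + W) * 257 - A * 257 ^ tgt.length + Bc) % pvM :=
      ((hx.mul_right 257).sub ((Int.ModEq.refl A).mul hp)).add (Int.ModEq.refl Bc)
    rw [h1]
    congr 1
    rw [hLL]
    ring

-- B-side loop invariant: with the correct window hash in hand, the loop appends the hits ≥ i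
lemma pvLoopB_eq (tgt te : List Char) :
    ∀ rem i (h : Int) (out : List String),
      i + rem = te.length + 1 - tgt.length →
      h = pvHash ((te.drop i).take tgt.length) →
      pvLoopB tgt te (pvHash tgt) (pvPw tgt.length) i rem h out
        = out ++ ((List.range' i rem).filter (pvHitP tgt te)).map (pvFmt tgt te) := by
  intro rem
  induction rem with
  | zero => intro i h out _ _; simp [pvLoopB]
  | succ rem IH =>
    intro i h out hcnt hh
    rw [pvLoopB]
    have hwin : PySem.List.slice te (some (i : Int)) (some ((i : Int) + (tgt.length : Int)))
        = (te.drop i).take tgt.length := PySem.List.slice_natCast_add te i tgt.length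
    have hcond : (h = pvHash tgt ∧
        PySem.List.slice te (some (i : Int)) (some ((i : Int) + (tgt.length : Int))) = tgt)
        ↔ pvHitP tgt te i = true := by
      unfold pvHitP
      rw [decide_eq_true_eq]
      constructor
      · exact fun hc => hc.2
      · intro hs
        refine ⟨?_, hs⟩
        rw [hh, ← hwin, hs]
    have hout' : (if h = pvHash tgt ∧
          PySem.List.slice te (some (i : Int)) (some ((i : Int) + (tgt.length : Int))) = tgt then
            out ++ [String.ofList (PySem.List.slice te (some (max 0 ((i : Int) - 10))) (some (i : Int)) ++ ['*'] ++
                tgt ++ ['*'] ++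
                PySem.List.slice te (some ((i : Int) + (tgt.length : Int)))
                  (some (min (if 10 ≤ tgt.length then (i : Int) + 10 else (i : Int) + (tgt.length : Int) + 3)
                             (te.length : Int))))]
          else out)
        = out ++ (if pvHitP tgt te i then [pvFmt tgt te i] else []) := by
      by_cases hp : pvHitP tgt te i = true
      · rw [if_pos (hcond.mpr hp), hp]
        rfl
      · rw [if_neg (fun hc => hp (hcond.mp hc))]
        simp [Bool.eq_false_iff.mpr hp]
    rw [hout']
    have hsplit : (List.range' i (rem + 1)).filter (pvHitP tgt te)
        = (if pvHitP tgt te i then [i] else []) ++ (List.range' (i + 1) rem).filter (pvHitP tgt te) := by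
      rw [List.range'_succ, List.filter_cons]
      by_cases hp : pvHitP tgt te i = true <;> simp [hp]
    rw [hsplit]
    cases rem with
    | zero =>
      rw [pvLoopB]
      simp only [List.range'_zero, List.filter_nil, List.append_nil]
      by_cases hp : pvHitP tgt te i = true <;> simp [hp]
    | succ rem' =>
      have hinb : i + tgt.length < te.length := by omega
      rw [if_pos hinb]
      rw [IH (i + 1) _ _ (by omega) (by rw [hh]; exact roll_eq tgt te i hinb)]
      by_cases hp : pvHitP tgt te i = true <;> simp [hp]

-- hits past position n - L are impossible (the window would be too short)
lemma filter_range_trunc (tgt te : List Char) :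
    (List.range' 0 (te.length + 1)).filter (pvHitP tgt te)
      = (List.range' 0 (te.length + 1 - tgt.length)).filter (pvHitP tgt te) := by
  have hsplit : List.range' 0 (te.length + 1)
      = List.range' 0 (te.length + 1 - tgt.length) ++
        List.range' (te.length + 1 - tgt.length) (te.length + 1 - (te.length + 1 - tgt.length)) := by
    have h := @List.range'_append 0 (te.length + 1 - tgt.length)
      (te.length + 1 - (te.length + 1 - tgt.length)) 1
    simp only [one_mul, Nat.zero_add] at h
    rw [h]
    congr 1
    omega
  rw [hsplit, List.filter_append]
  have htail : (List.range' (te.length + 1 - tgt.length)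
      (te.length + 1 - (te.length + 1 - tgt.length))).filter (pvHitP tgt te) = [] := by
    rw [List.filter_eq_nil_iff]
    intro a ha
    rw [List.mem_range'_1] at ha
    intro hp
    have hpre := (pvHitP_iff tgt te a).mp hp
    have hle := hpre.length_le
    rw [List.length_drop] at hle
    omega
  rw [htail, List.append_nil]

-- ===== VERDICT (by name: the statement is the Claim_ definition above) =====
theorem target_text_searcher_spec : Claim_equal_target_text_searcher := by
  intro target test _
  show target_text_searcher target test = target_text_searcher_alt target test
  unfold target_text_searcher target_text_searcher_alt
  have hA := targetLoopA_eq target.toList test.toList (test.toList.length + 1) 0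
    (test.toList.length + 2) [] (by omega) (by omega)
  have h0 : ((0 : Nat) : Int) - 1 = -1 := by norm_num
  rw [h0] at hA
  rw [hA]
  have hB := pvLoopB_eq target.toList test.toList
    (test.toList.length + 1 - target.toList.length) 0
    (pvHash (test.toList.take target.toList.length)) []
    (by omega) (by rw [List.drop_zero])
  simp only [List.nil_append] at hA hB ⊢
  rw [show (test.toList.take target.toList.length).foldl
      (fun h c => PySem.Int.mod (h * 257 + (c.toNat : Int)) pvM) 0
      = pvHash (test.toList.take target.toList.length) from rfl]
  rw [show target.toList.foldl (fun h c => PySem.Int.mod (h * 257 + (c.toNat : Int)) pvM) 0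
      = pvHash target.toList from rfl]
  rw [show (List.range target.toList.length).foldl (fun p _ => PySem.Int.mod (p * 257) pvM) 1
      = pvPw target.toList.length from rfl]
  rw [hB]
  rw [filter_range_trunc]
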